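-- pv_equiv track=rewrite | github.com/EDS-Bioinformatics-Laboratory/reseda | MutationsFromSam.py | fixCoordinates
-- ===== SOURCE A (Python) =====
-- def fixCoordinates(coord):
--     '''
--     Description: merge coordinates that are next to each other
--     In: list of tuples
--     Out: list of tuples
--     '''
--     newcoord = list()
--     (prev_start, prev_end) = coord[0]
--     for (start, end) in coord[1:]:
--         if start == prev_end:
--             # merge with previous
--             prev_end = end
--         else:
--             # store coordinates in new list
--             newcoord.append((prev_start, prev_end))
--             (prev_start, prev_end) = (start, end)
--     newcoord.append((prev_start, prev_end))
--
--     return(newcoord)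
-- ===== SOURCE B (Python) =====
-- def fixCoordinates(coord):
--     '''Merge coordinates that touch, scanning right-to-left and merging into
--     the last stored range; reverse at the end.'''
--     merged = []
--     for (start, end) in reversed(coord):
--         if merged and merged[-1][0] == end:
--             merged[-1] = (start, merged[-1][1])
--         else:
--             merged.append((start, end))
--     merged.reverse()
--     return merged
-- ===== Notes on version B (the rewrite author's own statement) =====
-- stated objective: alternative
-- what changed: B scans the list right-to-left and merges each tuple into the last stored range (reversing at the end), instead of A's left-to-right pass carrying (prev_start, prev_end) state and flushing on breaks.
import Mathlib
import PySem

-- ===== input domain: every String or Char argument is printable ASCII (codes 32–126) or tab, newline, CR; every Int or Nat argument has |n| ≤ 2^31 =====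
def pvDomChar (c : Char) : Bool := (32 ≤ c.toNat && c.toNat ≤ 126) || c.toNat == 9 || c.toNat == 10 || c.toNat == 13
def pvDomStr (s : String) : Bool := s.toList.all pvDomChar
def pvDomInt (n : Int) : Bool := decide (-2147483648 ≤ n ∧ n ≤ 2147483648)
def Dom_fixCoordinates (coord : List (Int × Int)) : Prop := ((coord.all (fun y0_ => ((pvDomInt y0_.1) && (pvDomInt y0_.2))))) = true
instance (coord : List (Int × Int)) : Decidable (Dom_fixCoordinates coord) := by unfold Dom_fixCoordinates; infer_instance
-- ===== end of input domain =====

-- B merges right-to-left into the last stored range and reverses at the end,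
-- instead of A's left-to-right pass with (prev_start, prev_end) state; return
-- values agree on all non-empty inputs (A raises IndexError on []).

-- ===== PORT A =====
-- the for-loop of A: state = (newcoord, prev_start, prev_end)
def fixA_loop (acc : List (Int × Int)) (rest : List (Int × Int)) (ps pe : Int) :
    List (Int × Int) :=
  match rest with
  | [] => acc ++ [(ps, pe)]
  | (s, e) :: rest' =>
    if s = pe then fixA_loop acc rest' ps e
    else fixA_loop (acc ++ [(ps, pe)]) rest' s e

def fixCoordinates (coord : List (Int × Int)) : List (Int × Int) :=
  match coord with
  | [] => []   -- unreachable under Pre_ (Python raises IndexError on coord[0])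
  | (ps, pe) :: rest => fixA_loop [] rest ps pe

-- ===== PORT B =====
-- one step of B's loop over reversed(coord): merged[-1] is the list's last element
def fixB_step (merged : List (Int × Int)) (se : Int × Int) : List (Int × Int) :=
  match merged.getLast? with
  | some m => if m.1 = se.2 then merged.dropLast ++ [(se.1, m.2)] else merged ++ [se]
  | none => [se]

def fixCoordinates_alt (coord : List (Int × Int)) : List (Int × Int) :=
  (coord.reverse.foldl fixB_step []).reverse

-- ===== PRECONDITION & SPEC =====
-- Pre_ excludes only the empty list, on which A raises IndexError at coord[0].
def Pre_fixCoordinates (coord : List (Int × Int)) : Prop := coord ≠ []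
instance (coord : List (Int × Int)) : Decidable (Pre_fixCoordinates coord) := by
  unfold Pre_fixCoordinates; infer_instance

def pvWitness_fixCoordinates : (List (Int × Int)) := [(1, 3), (3, 5), (7, 9)]

def Spec_fixCoordinates (coord : List (Int × Int)) (out : List (Int × Int)) : Prop :=
  out = fixCoordinates_alt coord
instance (coord : List (Int × Int)) (out : List (Int × Int)) :
    Decidable (Spec_fixCoordinates coord out) := by unfold Spec_fixCoordinates; infer_instance

-- ===== CLAIM (what is proved, stated in full; the proofs are below) =====
def Claim_equal_fixCoordinates : Prop := ∀ (coord : List (Int × Int)),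
  Dom_fixCoordinates coord → Pre_fixCoordinates coord →
  Spec_fixCoordinates coord (fixCoordinates coord)

-- ===== LEMMAS AND PROOFS =====

-- canonical recursive merge both ports are reduced to
def pvMerge (ps pe : Int) (rest : List (Int × Int)) : List (Int × Int) :=
  match rest with
  | [] => [(ps, pe)]
  | (s, e) :: rest' =>
    if s = pe then pvMerge ps e rest' else (ps, pe) :: pvMerge s e rest'

lemma fixA_loop_eq (rest : List (Int × Int)) :
    ∀ (acc : List (Int × Int)) (ps pe : Int),
      fixA_loop acc rest ps pe = acc ++ pvMerge ps pe rest := by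
  induction rest with
  | nil => intro acc ps pe; simp [fixA_loop, pvMerge]
  | cons hd tl ih =>
    intro acc ps pe
    obtain ⟨s, e⟩ := hd
    by_cases h : s = pe <;> simp [fixA_loop, pvMerge, h, ih]

-- one B step mirrors the cons-side step on the reversed state
def pvStep (se : Int × Int) (r : List (Int × Int)) : List (Int × Int) :=
  match r with
  | m :: rest => if m.1 = se.2 then (se.1, m.2) :: rest else se :: m :: rest
  | [] => [se]

lemma fixB_step_reverse (merged : List (Int × Int)) (se : Int × Int) :
    (fixB_step merged se).reverse = pvStep se merged.reverse := by
  match h : merged.reverse with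
  | [] =>
    have : merged = [] := by simpa using congrArg List.reverse h
    subst this; simp [fixB_step, pvStep]
  | m :: rest =>
    have hm : merged = rest.reverse ++ [m] := by
      have := congrArg List.reverse h; simpa using this
    subst hm
    by_cases hc : m.1 = se.2 <;>
      simp [fixB_step, pvStep, hc, List.getLast?_append]

lemma foldl_fixB_reverse (l : List (Int × Int)) :
    ∀ (acc : List (Int × Int)),
      (l.foldl fixB_step acc).reverse = l.foldl (fun r se => pvStep se r) acc.reverse := by
  induction l with
  | nil => intro acc; simp
  | cons hd tl ih =>
    intro acc
    simp only [List.foldl_cons, ih, fixB_step_reverse]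

lemma alt_eq_foldr (coord : List (Int × Int)) :
    fixCoordinates_alt coord = coord.foldr pvStep [] := by
  unfold fixCoordinates_alt
  rw [foldl_fixB_reverse]
  simp [List.foldl_reverse]

-- pvMerge's result only uses its start argument in the head's first component
lemma pvMerge_head (t : List (Int × Int)) :
    ∀ (e : Int), ∃ (f : Int) (r : List (Int × Int)),
      ∀ (a : Int), pvMerge a e t = (a, f) :: r := by
  induction t with
  | nil => intro e; exact ⟨e, [], fun a => rfl⟩
  | cons hd tl ih =>
    intro e
    obtain ⟨s, e'⟩ := hd
    by_cases h : s = e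
    · obtain ⟨f, r, hr⟩ := ih e'
      exact ⟨f, r, fun a => by simp [pvMerge, h, hr a]⟩
    · exact ⟨e, pvMerge s e' tl, fun a => by simp [pvMerge, h]⟩

lemma foldr_eq_merge (rest : List (Int × Int)) :
    ∀ (ps pe : Int),
      List.foldr pvStep [] ((ps, pe) :: rest) = pvMerge ps pe rest := by
  induction rest with
  | nil => intro ps pe; rfl
  | cons hd tl ih =>
    intro ps pe
    obtain ⟨s, e⟩ := hd
    obtain ⟨f, r, hr⟩ := pvMerge_head tl e
    have htl : List.foldr pvStep [] ((s, e) :: tl) = (s, f) :: r := by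
      rw [ih s e, hr s]
    by_cases h : s = pe
    · simp only [List.foldr_cons] at htl ⊢
      rw [htl]
      simp [pvStep, pvMerge, h, hr ps]
    · simp only [List.foldr_cons] at htl ⊢
      rw [htl]
      simp [pvStep, pvMerge, h, hr s]

-- ===== VERDICT (by name: the statement is the Claim_ definition above) =====
theorem fixCoordinates_spec : Claim_equal_fixCoordinates := by
  intro coord _ hpre
  unfold Spec_fixCoordinates
  match coord with
  | [] => exact absurd rfl hpre
  | (ps, pe) :: rest =>
    rw [alt_eq_foldr, foldr_eq_merge]
    simpa using fixA_loop_eq rest [] ps pe
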